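-- pv_equiv track=rewrite | github.com/gwerneckp/NSI-Epreuve-Pratique-2024 | sujets/sujet_40/sujet_answer_40.py | trouver_intrus
-- ===== SOURCE A (Python) =====
-- def trouver_intrus(tab: list[int], g: int, d: int) -> int:
--     """
--     Renvoie la valeur de l'intrus situé entre les indices g et d
--     dans la liste tab où :
--     tab vérifie les conditions de l'exercice,
--     g et d sont des multiples de 3.
--     """
--     if g == d:
--         return tab[g]
--
--     else:
--         nombre_de_triplets = (d - g) // 3
--         indice = g + 3 * (nombre_de_triplets // 2)
--
--         if tab[indice] == tab[indice + 1]: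
--             return trouver_intrus(tab, indice + 3, d)
--         else:
--             return trouver_intrus(tab, g, indice)
-- ===== SOURCE B (Python) =====
-- def trouver_intrus(tab: list[int], g: int, d: int) -> int:
--     for i in range(g, d, 3):
--         if tab[i] != tab[i + 1]:
--             return tab[i]
--     return tab[d]
-- ===== Notes on version B (the rewrite author's own statement) =====
-- stated objective: simpler
-- what changed: Replaces the recursive binary search over triplet blocks by a single left-to-right for-loop over the triplet start indices range(g, d, 3), returning tab[i] at the first i where tab[i] != tab[i+1] and tab[d] if none.
-- outside the precondition, e.g. on trouver_intrus([0, 1, 0, 2, 2, 2, 5], 0, 6): A returns 5, B returns 0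
import Mathlib
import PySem

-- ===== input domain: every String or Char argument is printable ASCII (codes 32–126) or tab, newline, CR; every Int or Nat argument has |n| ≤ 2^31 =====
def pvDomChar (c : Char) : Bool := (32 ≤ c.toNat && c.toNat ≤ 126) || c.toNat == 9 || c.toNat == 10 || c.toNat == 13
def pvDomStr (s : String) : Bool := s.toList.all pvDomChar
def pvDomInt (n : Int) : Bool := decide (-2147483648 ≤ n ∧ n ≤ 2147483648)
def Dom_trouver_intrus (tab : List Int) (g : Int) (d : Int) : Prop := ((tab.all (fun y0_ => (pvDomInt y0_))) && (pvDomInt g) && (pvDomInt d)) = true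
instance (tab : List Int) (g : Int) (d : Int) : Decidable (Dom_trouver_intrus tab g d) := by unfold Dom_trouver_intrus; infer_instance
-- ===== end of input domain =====

-- B replaces A's binary search over triplet blocks by a single left-to-right scan of
-- the triplet start indices; return value only, no mutation on either side.

-- ===== PORT A =====
-- literal port of A's recursion; fuel is only a totality guard, never reached inside Pre_
def trouver_intrus_go (tab : List Int) (fuel : Nat) (g : Int) (d : Int) : Int :=
  match fuel with
  | 0 => 0
  | fuel + 1 =>
    if g = d then (PySem.List.pyGet? tab g).getD 0
    else
      let nombre_de_triplets := PySem.Int.floordiv (d - g) 3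
      let indice := g + 3 * PySem.Int.floordiv nombre_de_triplets 2
      if (PySem.List.pyGet? tab indice).getD 0 = (PySem.List.pyGet? tab (indice + 1)).getD 0 then
        trouver_intrus_go tab fuel (indice + 3) d
      else
        trouver_intrus_go tab fuel g indice

def trouver_intrus (tab : List Int) (g : Int) (d : Int) : Int :=
  trouver_intrus_go tab ((d - g).toNat + 1) g d

-- ===== PORT B =====
-- the for-loop of Source B: walk the triplet starts range(g, d, 3) left to right,
-- return tab[i] at the first i with tab[i] != tab[i+1], else fall through to tab[d]
def trouver_intrus_alt_scan (tab : List Int) (d : Int) : List Int → Int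
  | [] => (PySem.List.pyGet? tab d).getD 0
  | i :: rest =>
    if (PySem.List.pyGet? tab i).getD 0 ≠ (PySem.List.pyGet? tab (i + 1)).getD 0 then
      (PySem.List.pyGet? tab i).getD 0
    else
      trouver_intrus_alt_scan tab d rest

def trouver_intrus_alt (tab : List Int) (g : Int) (d : Int) : Int :=
  trouver_intrus_alt_scan tab d (PySem.List.pyRange g d 3)

-- ===== PRECONDITION & SPEC =====
def pvProbe (tab : List Int) (i : Int) : Int := (PySem.List.pyGet? tab i).getD 0

-- the probed pairs, read along the step-3 grid from g, go equal…equal,unequal…unequal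
-- (the shape the exercise's "one intruder" precondition guarantees); stated over the
-- grid offsets k, l so it is decidable and covers negative (wrapping) start indices
def pvMono (tab : List Int) (g : Int) (d : Int) : Prop :=
  ∀ k l : Fin (d - g).toNat,
    k.1 ≤ l.1 → (k.1 : Int) % 3 = 0 → ((l.1 : Int) - (k.1 : Int)) % 3 = 0 →
    pvProbe tab (g + k.1) ≠ pvProbe tab (g + k.1 + 1) →
    pvProbe tab (g + l.1) ≠ pvProbe tab (g + l.1 + 1)

-- every pair the programs can probe, on the grid g, g+3, …, g+3*((d-g)//6), is unequal
def pvAllNe (tab : List Int) (g : Int) (d : Int) : Prop :=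
  ∀ k : Fin ((PySem.Int.floordiv (d - g) 6).toNat + 1),
    pvProbe tab (g + 3 * k.1) ≠ pvProbe tab (g + 3 * k.1 + 1)

-- Pre_ = the exercise's intended inputs (g ≤ d < len with a multiple-of-3 gap and the
-- monotone equal-then-unequal probe pattern a single intruder produces), plus the
-- inputs whose whole reachable probe grid is pairwise-unequal (there every comparison
-- fails and both programs answer tab[g]), plus the trivial g = d inputs.  It excludes
-- inputs where A raises (IndexError) or recurses forever, and non-monotone tabs —
-- those violate the function's documented "tab vérifie les conditions de l'exercice"
-- precondition, so A's value there is an unspecified corner and B's first-flip answer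
-- is as defensible as A's binary-probe answer.
def Pre_trouver_intrus (tab : List Int) (g : Int) (d : Int) : Prop :=
  (-(tab.length : Int) ≤ g ∧ g ≤ d ∧ d < (tab.length : Int) ∧ (d - g) % 3 = 0 ∧
    pvMono tab g d) ∨
  (-(tab.length : Int) ≤ g ∧ g ≤ d ∧
    g + 3 * PySem.Int.floordiv (d - g) 6 + 1 < (tab.length : Int) ∧ pvAllNe tab g d) ∨
  (g = d ∧ -(tab.length : Int) ≤ g ∧ g < (tab.length : Int))
instance (tab : List Int) (g : Int) (d : Int) : Decidable (Pre_trouver_intrus tab g d) := by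
  unfold Pre_trouver_intrus pvMono pvAllNe; infer_instance

def pvWitness_trouver_intrus : List Int × Int × Int := ([2, 2, 2, 5, 7, 7, 7], 0, 6)

def Spec_trouver_intrus (tab : List Int) (g : Int) (d : Int) (out : Int) : Prop := out = trouver_intrus_alt tab g d
instance (tab : List Int) (g : Int) (d : Int) (out : Int) : Decidable (Spec_trouver_intrus tab g d out) := by unfold Spec_trouver_intrus; infer_instance

-- ===== CLAIM (what is proved, stated in full; the proofs are below) =====
def Claim_equal_trouver_intrus : Prop := ∀ (tab : List Int) (g : Int) (d : Int), Dom_trouver_intrus tab g d → Pre_trouver_intrus tab g d → Spec_trouver_intrus tab g d (trouver_intrus tab g d)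

-- ===== LEMMAS AND PROOFS =====

-- step-3 range: nil and cons unfolding
lemma range3_nil (g d : Int) (h : d ≤ g) : PySem.List.pyRange g d 3 = [] := by
  rw [PySem.List.pyRange_of_pos g d (by norm_num)]
  simp [show ¬ g < d by omega]

lemma range3_cons (g d : Int) (h : g < d) :
    PySem.List.pyRange g d 3 = g :: PySem.List.pyRange (g + 3) d 3 := by
  rw [PySem.List.pyRange_of_pos g d (by norm_num),
      PySem.List.pyRange_of_pos (g + 3) d (by norm_num)]
  have hn : ((d - g + 3 - 1) / 3).toNat
      = (if g + 3 < d then ((d - (g + 3) + 3 - 1) / 3).toNat else 0) + 1 := by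
    split <;> omega
  rw [if_pos h, hn, List.range_succ_eq_map]
  simp only [List.map_cons, List.map_map]
  refine List.cons_eq_cons.mpr ⟨by push_cast; ring, List.map_congr_left fun k _ => ?_⟩
  simp [Function.comp, Nat.succ_eq_add_one]
  ring

-- split the step-3 range at a grid point
lemma range3_split (g mid d : Int) (h1 : g ≤ mid) (h2 : mid ≤ d) (h3 : (mid - g) % 3 = 0) :
    PySem.List.pyRange g d 3 = PySem.List.pyRange g mid 3 ++ PySem.List.pyRange mid d 3 := by
  have hk : ∃ k : Nat, mid - g = 3 * (k : Int) := ⟨(mid - g).toNat / 3, by omega⟩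
  obtain ⟨k, hk⟩ := hk
  induction k generalizing g with
  | zero => have : g = mid := by omega
            rw [this, range3_nil mid mid le_rfl, List.nil_append]
  | succ k ih =>
    have hgm : g < mid := by omega
    rw [range3_cons g d (by omega), range3_cons g mid hgm,
        ih (g + 3) (by omega) (by omega) (by push_cast at hk ⊢; omega)]
    simp

-- skip an all-equal prefix of the scanned starts
lemma scan_skip (tab : List Int) (d : Int) (l1 l2 : List Int)
    (h : ∀ i ∈ l1, pvProbe tab i = pvProbe tab (i + 1)) :
    trouver_intrus_alt_scan tab d (l1 ++ l2) = trouver_intrus_alt_scan tab d l2 := by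
  induction l1 with
  | nil => rfl
  | cons i l1 ih =>
    have hi := h i (by simp)
    simp only [List.cons_append, trouver_intrus_alt_scan]
    rw [if_neg (by simpa [pvProbe] using hi)]
    exact ih (fun j hj => h j (by simp [hj]))

-- cut the scan at an unequal start m: the tail and the default never matter
lemma scan_cut (tab : List Int) (d m : Int) (l1 rest : List Int)
    (h : pvProbe tab m ≠ pvProbe tab (m + 1)) :
    trouver_intrus_alt_scan tab d (l1 ++ m :: rest) = trouver_intrus_alt_scan tab m l1 := by
  induction l1 with
  | nil =>
    simp only [List.nil_append, trouver_intrus_alt_scan]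
    rw [if_pos (by simpa [pvProbe] using h)]
  | cons i l1 ih =>
    simp only [List.cons_append, trouver_intrus_alt_scan]
    by_cases hi : (PySem.List.pyGet? tab i).getD 0 ≠ (PySem.List.pyGet? tab (i + 1)).getD 0
    · rw [if_pos hi, if_pos hi]
    · rw [if_neg hi, if_neg hi]; exact ih

-- the fused division: ((d-g)//3)//2 = (d-g)//6
lemma fdiv_three_two (x : Int) :
    PySem.Int.floordiv (PySem.Int.floordiv x 3) 2 = PySem.Int.floordiv x 6 := by
  rw [PySem.Int.floordiv_eq_ediv_of_pos (a := x) (by norm_num),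
      PySem.Int.floordiv_eq_ediv_of_pos (by norm_num),
      PySem.Int.floordiv_eq_ediv_of_pos (by norm_num)]
  omega

-- pvMono, freed from the Fin offsets: the form the induction uses
def pvMonoI (tab : List Int) (g : Int) (d : Int) : Prop :=
  ∀ i j : Int, g ≤ i → i ≤ j → j < d → (i - g) % 3 = 0 → (j - i) % 3 = 0 →
    pvProbe tab i ≠ pvProbe tab (i + 1) → pvProbe tab j ≠ pvProbe tab (j + 1)

lemma mono_to_int (tab : List Int) (g d : Int) (h : pvMono tab g d) : pvMonoI tab g d := by
  intro i j hgi hij hjd h1 h2 hne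
  have := h ⟨(i - g).toNat, by omega⟩ ⟨(j - g).toNat, by omega⟩
    (by simp; omega) (by simp; omega) (by simp; omega)
  rw [show g + (((i - g).toNat : Nat) : Int) = i by omega,
      show g + (((j - g).toNat : Nat) : Int) = j by omega] at this
  exact this hne

-- REGION 1 (the exercise's inputs): both ports compute tab[first flip]
lemma go_eq_scan (tab : List Int) :
    ∀ (fuel : Nat) (g d : Int), -(tab.length : Int) ≤ g → g ≤ d → d < (tab.length : Int) →
      (d - g) % 3 = 0 → pvMonoI tab g d → (d - g).toNat < fuel →
      trouver_intrus_go tab fuel g d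
        = trouver_intrus_alt_scan tab d (PySem.List.pyRange g d 3) := by
  intro fuel
  induction fuel with
  | zero => intro g d _ _ _ _ _ h; omega
  | succ fuel ih =>
    intro g d hg0 hgd hdl h3 hmono hfuel
    simp only [trouver_intrus_go]
    by_cases heq : g = d
    · rw [heq, range3_nil d d le_rfl]; simp [trouver_intrus_alt_scan]
    · simp only [heq, if_false]
      have hlt : g < d := lt_of_le_of_ne hgd heq
      have hmid : g + 3 * PySem.Int.floordiv (PySem.Int.floordiv (d - g) 3) 2
          = g + 3 * PySem.Int.floordiv (d - g) 6 := by rw [fdiv_three_two]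
      set m := g + 3 * PySem.Int.floordiv (d - g) 6 with hm
      have hdiv : PySem.Int.floordiv (d - g) 6 = (d - g) / 6 :=
        PySem.Int.floordiv_eq_ediv_of_pos (by norm_num)
      have hmb : g ≤ m ∧ m ≤ d - 3 ∧ (m - g) % 3 = 0 := by
        refine ⟨?_, ?_, ?_⟩ <;> · rw [hm, hdiv]; omega
      rw [hmid]
      by_cases hc : (PySem.List.pyGet? tab m).getD 0 = (PySem.List.pyGet? tab (m + 1)).getD 0
      · -- equal at the midpoint: the whole prefix up to m is equal, the scan skips it
        simp only [hc, if_true]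
        have hpre : ∀ i ∈ PySem.List.pyRange g (m + 3) 3, pvProbe tab i = pvProbe tab (i + 1) := by
          intro i hi
          rw [PySem.List.mem_pyRange_iff_of_pos (by norm_num)] at hi
          obtain ⟨hi1, hi2, hi3⟩ := hi
          have him : i ≤ m := by omega
          by_contra hne
          have := hmono i m (by omega) (by omega) (by omega) (by omega) (by omega) hne
          exact this (by simpa [pvProbe] using hc)
        rw [range3_split g (m + 3) d (by omega) (by omega) (by omega),
            scan_skip tab d _ _ hpre]
        refine ih (m + 3) d (by omega) (by omega) hdl (by omega) ?_ (by omega)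
        · intro i j hi hij hj h1 h2 hne
          exact hmono i j (by omega) hij hj (by omega) h2 hne
      · -- unequal at the midpoint: the scan never looks past m
        simp only [hc, if_false]
        rw [range3_split g m d (by omega) (by omega) (by omega),
            range3_cons m d (by omega),
            scan_cut tab d m _ _ (by simpa [pvProbe] using hc)]
        refine ih g m hg0 (by omega) (by omega) (by omega) ?_ (by omega)
        · intro i j hi hij hj h1 h2 hne
          exact hmono i j hi hij (by omega) h1 h2 hne

-- REGION 2, A side: every reachable comparison fails, so d walks down to g
lemma go_allne (tab : List Int) :
    ∀ (fuel : Nat) (g d : Int), -(tab.length : Int) ≤ g → g ≤ d →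
      g + 3 * PySem.Int.floordiv (d - g) 6 + 1 < (tab.length : Int) →
      pvAllNe tab g d → (d - g).toNat < fuel →
      trouver_intrus_go tab fuel g d = (PySem.List.pyGet? tab g).getD 0 := by
  intro fuel
  induction fuel with
  | zero => intro g d _ _ _ _ h; omega
  | succ fuel ih =>
    intro g d hg0 hgd hprobe hne hfuel
    simp only [trouver_intrus_go]
    by_cases heq : g = d
    · simp [heq]
    · simp only [heq, if_false]
      have hlt : g < d := lt_of_le_of_ne hgd heq
      have hmid : g + 3 * PySem.Int.floordiv (PySem.Int.floordiv (d - g) 3) 2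
          = g + 3 * PySem.Int.floordiv (d - g) 6 := by rw [fdiv_three_two]
      have hdiv : PySem.Int.floordiv (d - g) 6 = (d - g) / 6 :=
        PySem.Int.floordiv_eq_ediv_of_pos (by norm_num)
      set q := PySem.Int.floordiv (d - g) 6 with hq
      have hq0 : 0 ≤ q ∧ g + 3 * q < d := by
        constructor <;> · rw [hdiv]; omega
      have hm : (PySem.List.pyGet? tab (g + 3 * q)).getD 0
          ≠ (PySem.List.pyGet? tab (g + 3 * q + 1)).getD 0 := by
        have := hne ⟨q.toNat, by omega⟩
        simpa [pvProbe, Int.toNat_of_nonneg hq0.1] using this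
      rw [hmid]
      simp only [hm, if_false]
      have hdiv' : PySem.Int.floordiv (g + 3 * q - g) 6 = (3 * q) / 6 := by
        rw [PySem.Int.floordiv_eq_ediv_of_pos (by norm_num)]; ring_nf
      have hqq : (3 * q) / 6 ≤ q := by omega
      refine ih g (g + 3 * q) hg0 (by omega) (by rw [hdiv']; omega) ?_ (by omega)
      · intro k
        have hk : (k.1 : Int) ≤ q := by
          have h2 := k.2
          omega
        exact hne ⟨k.1, by omega⟩

-- REGION 2, B side: the very first scanned pair is already unequal
lemma alt_allne (tab : List Int) (g d : Int)
    (hgd : g ≤ d)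
    (hne : pvAllNe tab g d) :
    trouver_intrus_alt tab g d = (PySem.List.pyGet? tab g).getD 0 := by
  unfold trouver_intrus_alt
  by_cases heq : g = d
  · rw [heq, range3_nil d d le_rfl]; simp [trouver_intrus_alt_scan]
  · have h0 : pvProbe tab (g + 3 * ((0 : Nat) : Int)) ≠ pvProbe tab (g + 3 * ((0 : Nat) : Int) + 1) :=
      hne ⟨0, by omega⟩
    simp only [Nat.cast_zero, mul_zero, add_zero] at h0
    rw [range3_cons g d (by omega)]
    simp only [trouver_intrus_alt_scan]
    rw [if_pos (by simpa [pvProbe] using h0)]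

-- ===== VERDICT (by name: the statement is the Claim_ definition above) =====
theorem trouver_intrus_spec : Claim_equal_trouver_intrus := by
  intro tab g d _ hpre
  unfold Spec_trouver_intrus
  rcases hpre with ⟨hg0, hgd, hdl, h3, hmono⟩ | ⟨hg0, hgd, hprobe, hne⟩ | ⟨heq, hg0, hg2⟩
  · unfold trouver_intrus trouver_intrus_alt
    exact go_eq_scan tab _ g d hg0 hgd hdl h3 (mono_to_int tab g d hmono) (by omega)
  · rw [alt_allne tab g d hgd hne]
    exact go_allne tab _ g d hg0 hgd hprobe hne (by omega)
  · subst heq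
    unfold trouver_intrus trouver_intrus_alt trouver_intrus_go
    rw [range3_nil g g le_rfl]
    simp [trouver_intrus_alt_scan]
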